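-- pv_equiv track=rewrite | github.com/jaehyun-dev/Algorithm-Problem-Solving | 백준/Silver/23284. 모든 스택 수열/모든 스택 수열.py | check
-- ===== SOURCE A (Python) =====
-- def check(arr):
--     visited = [arr[0]]
--     larger = []
--     smaller = []
--     i = 1
--     while i < len(arr):
--         for j in visited:
--             if j > arr[i]:
--                 larger.append(j)
--             if j < arr[i]:
--                 smaller.append(j)
--             for k in larger:
--                 for l in smaller:
--                     if visited.index(k) < visited.index(l):
--                         return False
--         visited.append(arr[i])
--         larger = []
--         smaller = []
--         i += 1
--     return True
-- ===== SOURCE B (Python) =====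
-- def check(arr):
--     # One pass: keep the distinct values seen so far in first-appearance order,
--     # and for each new element scan that list once with a running prefix-max.
--     firsts = []
--     for i in range(1, len(arr)):
--         prev = arr[i - 1]
--         if prev not in firsts:
--             firsts.append(prev)
--         x = arr[i]
--         m = None
--         for v in firsts:
--             if m is not None and m > x > v:
--                 return False
--             m = v if m is None else max(m, v)
--     return True
-- ===== Notes on version B (the rewrite author's own statement) =====
-- stated objective: faster
-- what changed: A's five nested scans (while over arr, for over visited, two inner loops over larger/smaller with repeated list.index calls) are replaced by a single pass that maintains the distinct values in first-appearance order and checks each element with one running-prefix-max scan of that list.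
import Mathlib
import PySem

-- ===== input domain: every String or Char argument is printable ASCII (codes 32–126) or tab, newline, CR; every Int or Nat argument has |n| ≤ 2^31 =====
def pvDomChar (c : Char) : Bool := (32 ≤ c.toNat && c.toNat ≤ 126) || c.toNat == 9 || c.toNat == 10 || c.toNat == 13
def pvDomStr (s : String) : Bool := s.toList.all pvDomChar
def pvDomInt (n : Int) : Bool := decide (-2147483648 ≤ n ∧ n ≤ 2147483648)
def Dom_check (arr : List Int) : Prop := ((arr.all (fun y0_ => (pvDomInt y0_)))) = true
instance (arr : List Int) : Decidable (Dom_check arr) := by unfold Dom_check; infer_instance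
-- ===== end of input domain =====

-- B replaces A's five nested scans (with repeated list.index) by a single pass that keeps the
-- distinct values in first-appearance order and checks each element with one running-max scan.

-- ===== PORT A =====
-- visited.index(k) < visited.index(l); both are always members when A evaluates this,
-- the `| _, _ => false` arms are unreachable there (Python would raise ValueError).
def pvIdxLt (visited : List Int) (k l : Int) : Bool :=
  match PySem.List.index? visited k, PySem.List.index? visited l with
  | some a, some b => decide (a < b)
  | _, _ => false

-- the two inner 'for k in larger: for l in smaller:' loops with the early return
def innerKL (visited larger smaller : List Int) : Bool :=
  larger.any (fun k => smaller.any (fun l => pvIdxLt visited k l))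

-- the 'for j in visited:' loop, accumulating larger/smaller and early-returning
def jloop (visited : List Int) (x : Int) : List Int → List Int → List Int → Bool
  | [], _, _ => false
  | j :: rest, larger, smaller =>
    let larger' := if x < j then larger ++ [j] else larger
    let smaller' := if j < x then smaller ++ [j] else smaller
    if innerKL visited larger' smaller' then true
    else jloop visited x rest larger' smaller'

-- the 'while i < len(arr):' loop; visited = arr[0:i]
def iloop : List Int → List Int → Bool
  | _, [] => true
  | visited, x :: rest =>
    if jloop visited x visited [] [] then false else iloop (visited ++ [x]) rest

def check (arr : List Int) : Bool :=
  match arr with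
  | [] => true          -- Python A raises IndexError on arr[0]; excluded by Pre_check
  | a :: rest => iloop [a] rest

-- ===== PORT B =====
-- 'for v in firsts:' with running max m (None at the start), early return on m > x > v
def bScan : Option Int → List Int → Int → Bool
  | _, [], _ => false
  | none, v :: rest, x => bScan (some v) rest x
  | some m, v :: rest, x =>
    if x < m && v < x then true else bScan (some (max m v)) rest x

-- the main 'for i in range(1, len(arr)):' loop; firsts = distinct values of arr[0:i] in order
def bLoop : List Int → Int → List Int → Bool
  | _, _, [] => true
  | firsts, prev, x :: rest =>
    let f := PySem.Set.add firsts prev    -- 'if prev not in firsts: firsts.append(prev)'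
    if bScan none f x then false else bLoop f x rest

def check_alt (arr : List Int) : Bool :=
  match arr with
  | [] => true
  | a :: rest => bLoop [] a rest

-- ===== PRECONDITION & SPEC =====
-- Pre_check only excludes the empty list, on which Python A raises IndexError (arr[0]).
def Pre_check (arr : List Int) : Prop := arr ≠ []
instance (arr : List Int) : Decidable (Pre_check arr) := by unfold Pre_check; infer_instance
def pvWitness_check : List Int := [3, 1, 2]

def Spec_check (arr : List Int) (out : Bool) : Prop := out = check_alt arr
instance (arr : List Int) (out : Bool) : Decidable (Spec_check arr out) := by unfold Spec_check; infer_instance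

-- ===== CLAIM (what is proved, stated in full; the proofs are below) =====
def Claim_equal_check : Prop := ∀ (arr : List Int), Dom_check arr → Pre_check arr → Spec_check arr (check arr)

-- ===== LEMMAS AND PROOFS =====

-- 'u's first occurrence in v is strictly before w's first occurrence' (both present)
def OrdIn : List Int → Int → Int → Prop
  | [], _, _ => False
  | a :: v, u, w => (a = u ∧ w ∈ v) ∨ (a ≠ u ∧ a ≠ w ∧ OrdIn v u w)

theorem OrdIn_mem {v : List Int} {u w : Int} (h : OrdIn v u w) : u ∈ v ∧ w ∈ v := by
  induction v with
  | nil => exact h.elim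
  | cons a v ih =>
    rcases h with ⟨rfl, hw⟩ | ⟨_, _, h⟩
    · exact ⟨List.mem_cons_self, List.mem_cons_of_mem _ hw⟩
    · exact ⟨List.mem_cons_of_mem _ (ih h).1, List.mem_cons_of_mem _ (ih h).2⟩

theorem pvIdxLt_iff_OrdIn {v : List Int} {u w : Int} (huw : u ≠ w) :
    pvIdxLt v u w = true ↔ OrdIn v u w := by
  induction v with
  | nil => simp [pvIdxLt, OrdIn, PySem.List.index?]
  | cons a v ih =>
    by_cases hau : a = u
    · subst hau
      have h1 : PySem.List.index? (a :: v) a = some 0 := PySem.List.index?_cons_self a v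
      have h2 : PySem.List.index? (a :: v) w = (PySem.List.index? v w).map (· + 1) :=
        PySem.List.index?_cons_of_ne v huw
      rw [pvIdxLt, h1, h2]
      rcases h3 : PySem.List.index? v w with _ | b
      · have hw : w ∉ v := by
          rw [← PySem.List.index?_eq_none_iff (v := w) (xs := v)] at *; exact h3
        simp [OrdIn, hw]
      · have hw : w ∈ v := by rw [← PySem.List.index?_isSome_iff (v := w) (xs := v)]; rw [h3]; rfl
        simp [OrdIn, hw]
    · by_cases haw : a = w
      · subst haw
        have h1 : PySem.List.index? (a :: v) a = some 0 := PySem.List.index?_cons_self a v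
        have h2 : PySem.List.index? (a :: v) u = (PySem.List.index? v u).map (· + 1) :=
          PySem.List.index?_cons_of_ne v hau
        rw [pvIdxLt, h2, h1]
        rcases h3 : PySem.List.index? v u with _ | b <;> simp [OrdIn, hau]
      · have h1 : PySem.List.index? (a :: v) u = (PySem.List.index? v u).map (· + 1) :=
          PySem.List.index?_cons_of_ne v hau
        have h2 : PySem.List.index? (a :: v) w = (PySem.List.index? v w).map (· + 1) :=
          PySem.List.index?_cons_of_ne v haw
        have : pvIdxLt (a :: v) u w = pvIdxLt v u w := by
          rw [pvIdxLt, pvIdxLt, h1, h2]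
          rcases PySem.List.index? v u with _ | b <;> rcases PySem.List.index? v w with _ | c <;> simp
        rw [this, ih]
        simp [OrdIn, hau, haw]

theorem OrdIn_concat {u w : Int} (huw : u ≠ w) : ∀ {v : List Int} {a : Int},
    OrdIn (v ++ [a]) u w ↔ OrdIn v u w ∨ (a = w ∧ u ∈ v ∧ w ∉ v) := by
  intro v
  induction v with
  | nil => intro a; simp [OrdIn]
  | cons b v ih =>
    intro a
    show (b = u ∧ w ∈ v ++ [a]) ∨ (b ≠ u ∧ b ≠ w ∧ OrdIn (v ++ [a]) u w) ↔ _
    rw [ih]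
    simp only [OrdIn, ne_eq, List.mem_append, List.mem_cons, List.not_mem_nil, or_false, eq_comm]
    have h1 : u = b → w = b → False := fun h h' => huw (h.trans h'.symm)
    tauto

theorem pair_sublist_cons {d : List Int} {v u w : Int} :
    List.Sublist [u, w] (v :: d) ↔ List.Sublist [u, w] d ∨ (u = v ∧ w ∈ d) := by
  rw [List.sublist_cons_iff]
  constructor
  · rintro (h | ⟨r, hr, hs⟩)
    · exact Or.inl h
    · cases hr
      exact Or.inr ⟨rfl, List.singleton_sublist.mp hs⟩
  · rintro (h | ⟨rfl, hw⟩)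
    · exact Or.inl h
    · exact Or.inr ⟨[w], rfl, List.singleton_sublist.mpr hw⟩

theorem pair_sublist_concat {L : List Int} {a u w : Int} :
    List.Sublist [u, w] (L ++ [a]) ↔ List.Sublist [u, w] L ∨ (a = w ∧ u ∈ L) := by
  induction L with
  | nil =>
    simp only [List.nil_append]
    rw [pair_sublist_cons]
    simp
  | cons b L ih =>
    rw [List.cons_append, pair_sublist_cons, pair_sublist_cons, ih]
    simp only [List.mem_append, List.mem_cons, eq_comm]
    tauto

theorem add_eq (s : List Int) (a : Int) :
    PySem.Set.add s a = if a ∈ s then s else s ++ [a] := by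
  simp [PySem.Set.add, PySem.Set.contains]

theorem ofList_concat (v : List Int) (a : Int) :
    PySem.Set.ofList (v ++ [a]) = PySem.Set.add (PySem.Set.ofList v) a := by
  simp [PySem.Set.ofList_eq_foldl, List.foldl_append]

theorem pair_ofList {u w : Int} (huw : u ≠ w) : ∀ {v : List Int},
    List.Sublist [u, w] (PySem.Set.ofList v) ↔ OrdIn v u w := by
  intro v
  induction v using List.reverseRecOn with
  | nil => simp [PySem.Set.ofList, OrdIn]
  | append_singleton v a ih =>
    rw [ofList_concat, add_eq]
    by_cases hav : a ∈ PySem.Set.ofList v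
    · have hav' : a ∈ v := (PySem.Set.mem_ofList v a).mp hav
      rw [if_pos hav, ih, OrdIn_concat huw]
      constructor
      · exact Or.inl
      · rintro (h | ⟨rfl, _, hw⟩); · exact h
        · exact absurd hav' hw
    · have hav' : a ∉ v := fun h => hav ((PySem.Set.mem_ofList v a).mpr h)
      rw [if_neg hav, pair_sublist_concat, ih, OrdIn_concat huw]
      constructor
      · rintro (h | ⟨rfl, hu⟩); · exact Or.inl h
        · exact Or.inr ⟨rfl, (PySem.Set.mem_ofList v u).mp hu, hav'⟩
      · rintro (h | ⟨rfl, hu, hw⟩); · exact Or.inl h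
        · exact Or.inr ⟨rfl, (PySem.Set.mem_ofList v u).mpr hu⟩

-- 'd contains, in order, a value above x and then a value below x'
def Pair (d : List Int) (x : Int) : Prop := ∃ u w : Int, x < u ∧ w < x ∧ List.Sublist [u, w] d

theorem Pair_cons {d : List Int} {v x : Int} :
    Pair (v :: d) x ↔ (x < v ∧ ∃ w ∈ d, w < x) ∨ Pair d x := by
  unfold Pair
  constructor
  · rintro ⟨u, w, hu, hw, hs⟩
    rcases pair_sublist_cons.mp hs with h | ⟨rfl, hwd⟩
    · exact Or.inr ⟨u, w, hu, hw, h⟩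
    · exact Or.inl ⟨hu, w, hwd, hw⟩
  · rintro (⟨hv, w, hwd, hw⟩ | ⟨u, w, hu, hw, hs⟩)
    · exact ⟨v, w, hv, hw, pair_sublist_cons.mpr (Or.inr ⟨rfl, hwd⟩)⟩
    · exact ⟨u, w, hu, hw, pair_sublist_cons.mpr (Or.inl hs)⟩

theorem bScan_some {x : Int} : ∀ (d : List Int) (m : Int),
    bScan (some m) d x = true ↔ (∃ w ∈ d, w < x ∧ x < m) ∨ Pair d x := by
  intro d
  induction d with
  | nil => intro m; simp [bScan, Pair]
  | cons v rest ih =>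
    intro m
    rw [show bScan (some m) (v :: rest) x
        = (if x < m && v < x then true else bScan (some (max m v)) rest x) from rfl]
    split_ifs with h
    · simp only [true_iff]
      simp only [Bool.and_eq_true, decide_eq_true_eq] at h
      exact Or.inl ⟨v, List.mem_cons_self, h.2, h.1⟩
    · rw [ih, Pair_cons]
      simp only [Bool.and_eq_true, decide_eq_true_eq, not_and] at h
      simp only [List.mem_cons, lt_max_iff]
      constructor
      · rintro (⟨w, hwd, hw, hm | hv⟩ | hp)
        · exact Or.inl ⟨w, Or.inr hwd, hw, hm⟩
        · exact Or.inr (Or.inl ⟨hv, w, hwd, hw⟩)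
        · exact Or.inr (Or.inr hp)
      · rintro (⟨w, rfl | hwd, hw, hm⟩ | ⟨hv, w, hwd, hw⟩ | hp)
        · exact absurd hw (by intro hw'; exact absurd hw' (by simpa using h hm))
        · exact Or.inl ⟨w, hwd, hw, Or.inl hm⟩
        · exact Or.inl ⟨w, hwd, hw, Or.inr hv⟩
        · exact Or.inr hp

theorem bScan_none {d : List Int} {x : Int} :
    bScan none d x = true ↔ Pair d x := by
  match d with
  | [] => simp [bScan, Pair]
  | v :: rest =>
    rw [show bScan none (v :: rest) x = bScan (some v) rest x from rfl, bScan_some, Pair_cons]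
    constructor
    · rintro (⟨w, hwd, hw, hv⟩ | hp)
      · exact Or.inl ⟨hv, w, hwd, hw⟩
      · exact Or.inr hp
    · rintro (⟨hv, w, hwd, hw⟩ | hp)
      · exact Or.inl ⟨w, hwd, hw, hv⟩
      · exact Or.inr hp

theorem innerKL_iff {v L S : List Int} :
    innerKL v L S = true ↔ ∃ k ∈ L, ∃ l ∈ S, pvIdxLt v k l = true := by
  simp [innerKL]

theorem innerKL_mono {v L S L' S' : List Int} (h : innerKL v L S = true) :
    innerKL v (L ++ L') (S ++ S') = true := by
  rcases innerKL_iff.mp h with ⟨k, hk, l, hl, hi⟩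
  exact innerKL_iff.mpr ⟨k, List.mem_append_left _ hk, l, List.mem_append_left _ hl, hi⟩

theorem jloop_eq {v : List Int} {x : Int} : ∀ (js L S : List Int),
    innerKL v L S = false →
    jloop v x js L S
      = innerKL v (L ++ js.filter (fun j => decide (x < j))) (S ++ js.filter (fun j => decide (j < x))) := by
  intro js
  induction js with
  | nil => intro L S h; simpa [jloop] using h.symm
  | cons j rest ih =>
    intro L S h
    rw [show jloop v x (j :: rest) L S
        = (if innerKL v (if x < j then L ++ [j] else L) (if j < x then S ++ [j] else S) then true
           else jloop v x rest (if x < j then L ++ [j] else L) (if j < x then S ++ [j] else S)) from rfl]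
    have hL : L ++ (j :: rest).filter (fun j => decide (x < j))
        = (if x < j then L ++ [j] else L) ++ rest.filter (fun j => decide (x < j)) := by
      rw [List.filter_cons]
      split_ifs with h1 h2 h3 <;> simp_all
    have hS : S ++ (j :: rest).filter (fun j => decide (j < x))
        = (if j < x then S ++ [j] else S) ++ rest.filter (fun j => decide (j < x)) := by
      rw [List.filter_cons]
      split_ifs with h1 h2 h3 <;> simp_all
    rw [hL, hS]
    by_cases hin : innerKL v (if x < j then L ++ [j] else L) (if j < x then S ++ [j] else S) = true
    · rw [if_pos hin]; exact (innerKL_mono hin).symm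
    · rw [if_neg hin]; exact ih _ _ (by simpa using hin)

-- one step of A's while loop equals one step of B's loop
theorem step_eq (v : List Int) (x : Int) :
    jloop v x v [] [] = bScan none (PySem.Set.ofList v) x := by
  rw [Bool.eq_iff_iff]
  rw [jloop_eq v [] [] (by simp [innerKL]), bScan_none]
  simp only [List.nil_append]
  rw [innerKL_iff]
  constructor
  · rintro ⟨k, hk, l, hl, hp⟩
    rw [List.mem_filter, decide_eq_true_eq] at hk hl
    have hne : k ≠ l := fun h => by omega
    exact ⟨k, l, hk.2, hl.2, (pair_ofList hne).mpr ((pvIdxLt_iff_OrdIn hne).mp hp)⟩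
  · rintro ⟨u, w, hu, hw, hs⟩
    have hne : u ≠ w := fun h => by omega
    have ho : OrdIn v u w := (pair_ofList hne).mp hs
    have hm := OrdIn_mem ho
    exact ⟨u, List.mem_filter.mpr ⟨hm.1, by simpa using hu⟩,
           w, List.mem_filter.mpr ⟨hm.2, by simpa using hw⟩,
           (pvIdxLt_iff_OrdIn hne).mpr ho⟩

theorem main_loop : ∀ (rest visited : List Int) (prev : Int),
    iloop (visited ++ [prev]) rest = bLoop (PySem.Set.ofList visited) prev rest := by
  intro rest
  induction rest with
  | nil => intro visited prev; rfl
  | cons x rest ih =>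
    intro visited prev
    show (if jloop (visited ++ [prev]) x (visited ++ [prev]) [] [] then false
          else iloop ((visited ++ [prev]) ++ [x]) rest)
        = (if bScan none (PySem.Set.add (PySem.Set.ofList visited) prev) x then false
           else bLoop (PySem.Set.add (PySem.Set.ofList visited) prev) x rest)
    rw [← ofList_concat, ← step_eq, ih]

-- ===== VERDICT (by name: the statement is the Claim_ definition above) =====
theorem check_spec : Claim_equal_check := by
  intro arr _ _
  unfold Spec_check
  match arr with
  | [] => rfl
  | a :: rest =>
    show iloop [a] rest = bLoop [] a rest
    simpa using main_loop rest [] a
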